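-- pv_equiv track=rewrite | github.com/pypi-data/pypi-mirror-400 | packages/rxiv-maker/rxiv_maker-1.18.3-py3-none-any.whl/rxiv_maker/processors/template_processor.py | parse_supplementary_sections
-- ===== SOURCE A (Python) =====
-- def parse_supplementary_sections(content):
--     """Parse supplementary markdown content into separate sections.
--
--     Separates content based on level 2 headers:
--     - ## Supplementary Tables
--     - ## Supplementary Notes
--     - ## Supplementary Figures
--
--     Returns:
--         dict: Dictionary with 'tables', 'notes', and 'figures' keys
--     """
--     sections = {"tables": "", "notes": "", "figures": ""}
--
--     # Split content by lines
--     lines = content.split("\n")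
--     current_section = None
--     section_content: list[str] = []
--
--     for line in lines:
--         stripped = line.strip()
--
--         # Check for section markers (level 2 headers)
--         if stripped.startswith("## Supplementary Tables"):
--             # Save previous section if exists
--             if current_section and section_content:
--                 sections[current_section] = "\n".join(section_content)
--             current_section = "tables"
--             section_content = []
--         elif stripped.startswith("## Supplementary Notes"):
--             # Save previous section if exists
--             if current_section and section_content:
--                 sections[current_section] = "\n".join(section_content)
--             current_section = "notes"
--             section_content = []
--         elif stripped.startswith("## Supplementary Figures"):
--             # Save previous section if exists
--             if current_section and section_content:
--                 sections[current_section] = "\n".join(section_content)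
--             current_section = "figures"
--             section_content = []
--         else:
--             # Add line to current section
--             if current_section:
--                 section_content.append(line)
--
--     # Save the last section
--     if current_section and section_content:
--         sections[current_section] = "\n".join(section_content)
--
--     return sections
-- ===== SOURCE B (Python) =====
-- def parse_supplementary_sections(content):
--     """Parse supplementary markdown content into separate sections.
--
--     Two passes: first record the index and section name of every
--     '## Supplementary X' header line, then slice the blocks between
--     consecutive headers and keep each non-empty block.
--     """
--     sections = {"tables": "", "notes": "", "figures": ""}
--     lines = content.split("\n")
--     prefixes = [
--         ("## Supplementary Tables", "tables"),
--         ("## Supplementary Notes", "notes"),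
--         ("## Supplementary Figures", "figures"),
--     ]
--     headers = [
--         (i, name)
--         for i, line in enumerate(lines)
--         for prefix, name in prefixes
--         if line.strip().startswith(prefix)
--     ]
--     for k, (i, name) in enumerate(headers):
--         end = headers[k + 1][0] if k + 1 < len(headers) else len(lines)
--         block = lines[i + 1 : end]
--         if block:
--             sections[name] = "\n".join(block)
--     return sections
-- ===== Notes on version B (the rewrite author's own statement) =====
-- stated objective: alternative
-- what changed: Replaces A's single-pass state machine (current section + deferred save buffer) with two passes: collect (index, name) of every header line, then slice the original lines between consecutive headers and assign each non-empty block.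
import Mathlib
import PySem

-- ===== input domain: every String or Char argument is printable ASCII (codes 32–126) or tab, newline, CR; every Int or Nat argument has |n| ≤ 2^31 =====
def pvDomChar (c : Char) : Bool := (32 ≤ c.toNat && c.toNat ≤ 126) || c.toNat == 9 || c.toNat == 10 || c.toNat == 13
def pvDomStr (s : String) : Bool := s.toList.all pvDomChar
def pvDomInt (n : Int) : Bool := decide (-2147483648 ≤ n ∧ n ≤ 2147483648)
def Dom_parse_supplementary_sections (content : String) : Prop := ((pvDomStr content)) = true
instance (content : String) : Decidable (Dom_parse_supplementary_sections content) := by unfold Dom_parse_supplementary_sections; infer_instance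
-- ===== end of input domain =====

-- Alternative re-implementation: A's one-pass state machine vs B's two-pass header-index + slice
-- decomposition; equal return value proved on the whole domain (no mutation involved).

-- ===== PORT A =====
-- the for-loop of A as structural recursion over the lines, state (sections, current_section, section_content)
def pvLoopA (d : PySem.Dict String String) (cur : Option String) (acc : List String) :
    List String → PySem.Dict String String
  | [] =>
      -- save the last section
      match cur with
      | none => d
      | some c => if acc ≠ [] then d.insert c (PySem.Str.join "\n" acc) else d
  | line :: rest =>
      let stripped := PySem.Str.strip line
      if PySem.Str.startswith stripped "## Supplementary Tables" then
        pvLoopA (match cur with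
                 | none => d
                 | some c => if acc ≠ [] then d.insert c (PySem.Str.join "\n" acc) else d)
          (some "tables") [] rest
      else if PySem.Str.startswith stripped "## Supplementary Notes" then
        pvLoopA (match cur with
                 | none => d
                 | some c => if acc ≠ [] then d.insert c (PySem.Str.join "\n" acc) else d)
          (some "notes") [] rest
      else if PySem.Str.startswith stripped "## Supplementary Figures" then
        pvLoopA (match cur with
                 | none => d
                 | some c => if acc ≠ [] then d.insert c (PySem.Str.join "\n" acc) else d)
          (some "figures") [] rest
      else
        pvLoopA d cur (if cur.isSome then acc ++ [line] else acc) rest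

def parse_supplementary_sections (content : String) : List (String × String) :=
  let sections : PySem.Dict String String :=
    PySem.Dict.ofList [("tables", ""), ("notes", ""), ("figures", "")]
  let lines := (PySem.Str.split? content "\n").getD []  -- exact: separator "\n" is non-empty, split? is always some
  (pvLoopA sections none [] lines).items

-- ===== PORT B =====
def pvPrefixes : List (String × String) :=
  [("## Supplementary Tables", "tables"),
   ("## Supplementary Notes", "notes"),
   ("## Supplementary Figures", "figures")]

-- the header comprehension: which of the three prefixes (if any) this line starts with
def pvHeaderName? (line : String) : Option String :=
  (pvPrefixes.find? (fun p => PySem.Str.startswith (PySem.Str.strip line) p.1)).map (·.2)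

-- the second for-loop over the headers list (lookahead headers[k+1] = head of the rest)
def pvAssignB (lines : List String) (d : PySem.Dict String String) :
    List (Int × String) → PySem.Dict String String
  | [] => d
  | (i, name) :: rest =>
      let e : Int := match rest with
        | (j, _) :: _ => j
        | [] => (lines.length : Int)
      let block := PySem.List.slice lines (some (i + 1)) (some e)
      pvAssignB lines
        (if block ≠ [] then d.insert name (PySem.Str.join "\n" block) else d) rest

def parse_supplementary_sections_alt (content : String) : List (String × String) :=
  let sections : PySem.Dict String String :=
    PySem.Dict.ofList [("tables", ""), ("notes", ""), ("figures", "")]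
  let lines := (PySem.Str.split? content "\n").getD []  -- exact: separator "\n" is non-empty, split? is always some
  let headers : List (Int × String) :=
    (PySem.List.enumerate lines).filterMap
      (fun p => (pvHeaderName? p.2).map (fun name => (p.1, name)))
  (pvAssignB lines sections headers).items

-- ===== PRECONDITION & SPEC =====
def Spec_parse_supplementary_sections (content : String) (out : List (String × String)) : Prop := out = parse_supplementary_sections_alt content
instance (content : String) (out : List (String × String)) : Decidable (Spec_parse_supplementary_sections content out) := by unfold Spec_parse_supplementary_sections; infer_instance

-- ===== CLAIM (what is proved, stated in full; the proofs are below) =====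
def Claim_equal_parse_supplementary_sections : Prop := ∀ (content : String), Dom_parse_supplementary_sections content → Spec_parse_supplementary_sections content (parse_supplementary_sections content)


-- ===== LEMMAS AND PROOFS =====

-- proof-side view shared by both ports: the list of (name, block) pairs in header order
def pvNoHdr (x : String) : Bool := (pvHeaderName? x).isNone

def pvSave (d : PySem.Dict String String) (cur : Option String) (acc : List String) :
    PySem.Dict String String :=
  match cur with
  | none => d
  | some c => if acc ≠ [] then d.insert c (PySem.Str.join "\n" acc) else d

def pvBlocks : List String → List (String × List String)
  | [] => []
  | l :: ls =>
      match pvHeaderName? l with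
      | some nm => (nm, ls.takeWhile pvNoHdr) :: pvBlocks (ls.dropWhile pvNoHdr)
      | none => pvBlocks ls
termination_by l => l.length
decreasing_by
  · exact Nat.lt_succ_of_le (List.length_dropWhile_le _ _)
  · exact Nat.lt_succ_of_le (Nat.le_refl _)

def pvFold (d : PySem.Dict String String) (bs : List (String × List String)) :
    PySem.Dict String String :=
  bs.foldl (fun d b => if b.2 ≠ [] then d.insert b.1 (PySem.Str.join "\n" b.2) else d) d

theorem pvFold_cons (d : PySem.Dict String String) (b : String × List String)
    (bs : List (String × List String)) :
    pvFold d (b :: bs) =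
      pvFold (if b.2 ≠ [] then d.insert b.1 (PySem.Str.join "\n" b.2) else d) bs := rfl

theorem pvBlocks_nil : pvBlocks [] = [] := by rw [pvBlocks]

theorem pvBlocks_cons_some {l : String} {nm : String} (ls : List String)
    (h : pvHeaderName? l = some nm) :
    pvBlocks (l :: ls) = (nm, ls.takeWhile pvNoHdr) :: pvBlocks (ls.dropWhile pvNoHdr) := by
  rw [pvBlocks, h]

theorem pvBlocks_cons_none {l : String} (ls : List String) (h : pvHeaderName? l = none) :
    pvBlocks (l :: ls) = pvBlocks ls := by
  rw [pvBlocks, h]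

-- general take/drop facts about takeWhile (specific splitting used by the slice argument)
theorem pv_take_len_takeWhile (p : String → Bool) (l : List String) :
    l.take (l.takeWhile p).length = l.takeWhile p := by
  induction l with
  | nil => simp
  | cons x xs ih => by_cases h : p x <;> simp [h, ih]

theorem pv_drop_len_takeWhile (p : String → Bool) (l : List String) :
    l.drop (l.takeWhile p).length = l.dropWhile p := by
  induction l with
  | nil => simp
  | cons x xs ih => by_cases h : p x <;> simp [h, ih]

theorem pv_dropWhile_head_false (p : String → Bool) (l ys : List String) (y : String)
    (h : l.dropWhile p = y :: ys) : p y = false := by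
  induction l with
  | nil => simp at h
  | cons x xs ih =>
      rw [List.dropWhile_cons] at h
      by_cases hx : p x
      · simp [hx] at h; exact ih h
      · simp [hx] at h; simp [← h.1, hx]

theorem pv_takeWhile_of_dropWhile_nil (p : String → Bool) (l : List String)
    (h : l.dropWhile p = []) : l.takeWhile p = l := by
  have := List.takeWhile_append_dropWhile (p := p) (l := l)
  rw [h] at this; simpa using this

-- A's per-line dispatch is exactly pvHeaderName?
theorem pvHeaderName_ite (line : String) :
    pvHeaderName? line =
      (if PySem.Str.startswith (PySem.Str.strip line) "## Supplementary Tables" then some "tables"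
       else if PySem.Str.startswith (PySem.Str.strip line) "## Supplementary Notes" then some "notes"
       else if PySem.Str.startswith (PySem.Str.strip line) "## Supplementary Figures" then some "figures"
       else none) := by
  cases h1 : PySem.Str.startswith (PySem.Str.strip line) "## Supplementary Tables" <;>
    cases h2 : PySem.Str.startswith (PySem.Str.strip line) "## Supplementary Notes" <;>
      cases h3 : PySem.Str.startswith (PySem.Str.strip line) "## Supplementary Figures" <;>
        simp only [pvHeaderName?, pvPrefixes, List.find?_cons, h1, h2, h3,
          List.find?_nil, Option.map_some, Option.map_none, if_true] <;> rfl

theorem pvLoopA_cons (d : PySem.Dict String String) (cur : Option String)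
    (acc : List String) (line : String) (rest : List String) :
    pvLoopA d cur acc (line :: rest) =
      match pvHeaderName? line with
      | some nm => pvLoopA (pvSave d cur acc) (some nm) [] rest
      | none => pvLoopA d cur (if cur.isSome then acc ++ [line] else acc) rest := by
  rw [pvHeaderName_ite]
  cases h1 : PySem.Str.startswith (PySem.Str.strip line) "## Supplementary Tables" <;>
    cases h2 : PySem.Str.startswith (PySem.Str.strip line) "## Supplementary Notes" <;>
      cases h3 : PySem.Str.startswith (PySem.Str.strip line) "## Supplementary Figures" <;>
        simp only [pvLoopA, h1, h2, h3, pvSave] <;> simp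

-- A's loop, after a header nm has been seen with buffer acc, finishes like pvFold
theorem pvLoopA_some (lines : List String) : ∀ (d : PySem.Dict String String)
    (nm : String) (acc : List String),
    pvLoopA d (some nm) acc lines =
      pvFold d ((nm, acc ++ lines.takeWhile pvNoHdr) :: pvBlocks (lines.dropWhile pvNoHdr)) := by
  induction lines with
  | nil => intro d nm acc; simp [pvLoopA, pvFold, pvBlocks]
  | cons line rest ih =>
      intro d nm acc
      rw [pvLoopA_cons]
      cases h : pvHeaderName? line with
      | none =>
          dsimp only
          rw [ih]
          have hn : pvNoHdr line = true := by simp [pvNoHdr, h]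
          simp [hn]
      | some nm' =>
          dsimp only
          rw [ih]
          have hn : pvNoHdr line = false := by simp [pvNoHdr, h]
          rw [List.takeWhile_cons, List.dropWhile_cons, hn]
          simp only [Bool.false_eq_true, if_false, List.append_nil, List.nil_append]
          rw [pvBlocks_cons_some rest h]
          simp only [pvFold_cons]
          dsimp only [pvSave]

theorem pvLoopA_none (lines : List String) : ∀ (d : PySem.Dict String String),
    pvLoopA d none [] lines = pvFold d (pvBlocks lines) := by
  induction lines with
  | nil => intro d; simp [pvLoopA, pvFold, pvBlocks]
  | cons line rest ih =>
      intro d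
      rw [pvLoopA_cons]
      cases h : pvHeaderName? line with
      | none =>
          dsimp only
          simp only [Option.isSome_none, Bool.false_eq_true, if_false]
          rw [ih, pvBlocks_cons_none rest h]
      | some nm =>
          dsimp only
          rw [pvLoopA_some, pvBlocks_cons_some rest h]
          dsimp only [pvSave]
          simp only [pvFold_cons, List.nil_append]

-- B's header list, parametrised by the start index of the suffix being scanned
def pvHs (s : Nat) (ls : List String) : List (Int × String) :=
  (PySem.List.enumerate ls (s : Int)).filterMap
    (fun p => (pvHeaderName? p.2).map (fun name => (p.1, name)))

theorem pvHs_nil (s : Nat) : pvHs s [] = [] := by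
  rw [pvHs, PySem.List.enumerate_nil, List.filterMap_nil]

theorem pvHs_cons (s : Nat) (x : String) (xs : List String) :
    pvHs s (x :: xs) =
      match pvHeaderName? x with
      | some nm => ((s : Int), nm) :: pvHs (s + 1) xs
      | none => pvHs (s + 1) xs := by
  have hc : ((s : Int) + 1) = (((s + 1 : Nat)) : Int) := by push_cast; ring
  unfold pvHs
  rw [PySem.List.enumerate_cons, List.filterMap_cons, hc]
  cases h : pvHeaderName? x
  · simp
  · simp

theorem pvHs_skip (ls : List String) : ∀ (s : Nat),
    pvHs s ls = pvHs (s + (ls.takeWhile pvNoHdr).length) (ls.dropWhile pvNoHdr) := by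
  induction ls with
  | nil => intro s; simp [pvHs_nil]
  | cons x xs ih =>
      intro s
      cases h : pvHeaderName? x with
      | none =>
          have hn : pvNoHdr x = true := by simp [pvNoHdr, h]
          rw [pvHs_cons, h]
          dsimp only
          rw [ih (s + 1), List.takeWhile_cons, List.dropWhile_cons, hn]
          simp only [if_true, List.length_cons]
          have harith : s + 1 + (List.takeWhile pvNoHdr xs).length =
              s + ((List.takeWhile pvNoHdr xs).length + 1) := by omega
          rw [harith]
      | some nm =>
          have hn : pvNoHdr x = false := by simp [pvNoHdr, h]
          rw [List.takeWhile_cons, List.dropWhile_cons, hn]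
          simp

-- B's second loop over the collected headers computes pvFold of the blocks
theorem pvAssignB_eq (n : Nat) : ∀ (ls : List String) (s : Nat)
    (d : PySem.Dict String String) (lines : List String),
    ls.length ≤ n → ls = lines.drop s →
    pvAssignB lines d (pvHs s ls) = pvFold d (pvBlocks ls) := by
  induction n with
  | zero =>
      intro ls s d lines hlen hdrop
      have hnil : ls = [] := List.eq_nil_of_length_eq_zero (Nat.le_zero.mp hlen)
      subst hnil
      rw [pvHs_nil, pvBlocks_nil]
      rfl
  | succ n ih =>
      intro ls s d lines hlen hdrop
      cases ls with
      | nil => rw [pvHs_nil, pvBlocks_nil]; rfl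
      | cons x xs =>
          have hxs : xs = lines.drop (s + 1) := by
            have h2 : (lines.drop s).drop 1 = lines.drop (s + 1) := by rw [List.drop_drop]
            rw [← h2, ← hdrop]
            simp
          have hxslen : xs.length ≤ n := by simpa using Nat.le_of_succ_le_succ hlen
          cases h : pvHeaderName? x with
          | none =>
              rw [pvHs_cons, h]
              dsimp only
              rw [pvBlocks_cons_none xs h]
              exact ih xs (s + 1) d lines hxslen hxs
          | some nm =>
              rw [pvHs_cons, h]
              dsimp only
              rw [pvHs_skip xs (s + 1)]
              have hq : s + 1 + (xs.takeWhile pvNoHdr).length =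
                  (s + 1) + (xs.takeWhile pvNoHdr).length := rfl
              set q := (xs.takeWhile pvNoHdr).length with hqdef
              have hdw : xs.drop q = xs.dropWhile pvNoHdr := pv_drop_len_takeWhile pvNoHdr xs
              have htw : xs.take q = xs.takeWhile pvNoHdr := pv_take_len_takeWhile pvNoHdr xs
              have hdrop2 : xs.dropWhile pvNoHdr = lines.drop (s + 1 + q) := by
                rw [← hdw, hxs, List.drop_drop]
              have hcast : (s : Int) + 1 = (((s + 1 : Nat)) : Int) := by push_cast; ring
              rw [pvBlocks_cons_some xs h]
              cases hdwc : xs.dropWhile pvNoHdr with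
              | nil =>
                  rw [hdwc] at hdrop2
                  rw [pvHs_nil]
                  have htww : xs.takeWhile pvNoHdr = xs :=
                    pv_takeWhile_of_dropWhile_nil pvNoHdr xs hdwc
                  have hblock :
                      PySem.List.slice lines (some ((s : Int) + 1)) (some ((lines.length : Nat) : Int))
                        = xs := by
                    rw [hcast, PySem.List.slice_natCast, ← hxs]
                    refine List.take_of_length_le ?_
                    rw [hxs, List.length_drop]
                  rw [pvAssignB]
                  rw [hblock, htww, pvAssignB, pvBlocks_nil, pvFold_cons]
                  rfl
              | cons y ys =>
                  have hy0 : pvNoHdr y = false := pv_dropWhile_head_false pvNoHdr xs ys y hdwc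
                  have hy : ∃ nm'', pvHeaderName? y = some nm'' := by
                    cases hyc : pvHeaderName? y with
                    | none => rw [pvNoHdr, hyc] at hy0; simp at hy0
                    | some nm'' => exact ⟨nm'', rfl⟩
                  obtain ⟨nm'', hy⟩ := hy
                  have hexp : pvHs (s + 1 + q) (y :: ys) =
                      (((s + 1 + q : Nat) : Int), nm'') :: pvHs (s + 1 + q + 1) ys := by
                    rw [pvHs_cons, hy]
                  rw [hexp]
                  have hblock :
                      PySem.List.slice lines (some ((s : Int) + 1))
                          (some (((s + 1 + q : Nat)) : Int))
                        = xs.takeWhile pvNoHdr := by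
                    rw [hcast, PySem.List.slice_natCast, ← hxs]
                    have : s + 1 + q - (s + 1) = q := by omega
                    rw [this, htw]
                  rw [pvAssignB]
                  rw [hblock, ← hexp, pvFold_cons]
                  have hlen2 : (y :: ys).length ≤ n := by
                    rw [← hdwc]
                    exact le_trans (List.length_dropWhile_le _ _) hxslen
                  have hdrop3 : y :: ys = lines.drop (s + 1 + q) := by
                    rw [← hdwc, hdrop2]
                  exact ih (y :: ys) (s + 1 + q)
                    (if (xs.takeWhile pvNoHdr) ≠ [] then
                        d.insert nm (PySem.Str.join "\n" (xs.takeWhile pvNoHdr)) else d)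
                    lines hlen2 hdrop3

-- final glue


-- ===== VERDICT (by name: the statement is the Claim_ definition above) =====
theorem parse_supplementary_sections_spec : Claim_equal_parse_supplementary_sections := by
  intro content _
  unfold Spec_parse_supplementary_sections parse_supplementary_sections
    parse_supplementary_sections_alt
  dsimp only
  rw [pvLoopA_none]
  have hB : (PySem.List.enumerate ((PySem.Str.split? content "\n").getD [])).filterMap
      (fun p => (pvHeaderName? p.2).map (fun name => (p.1, name))) =
      pvHs 0 ((PySem.Str.split? content "\n").getD []) := by
    rw [pvHs]
    norm_num
  rw [hB, pvAssignB_eq ((PySem.Str.split? content "\n").getD []).length _ 0 _ _ le_rfl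
    List.drop_zero.symm]
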